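-- pv_equiv track=rewrite | github.com/KanoMahoroSuki/Testing-Preparation | 061放苹果.py | apple
-- ===== SOURCE A (Python) =====
-- def apple(m, n):
--     if m == 0:
--         return 1
--     if n == 0:
--         return 0
--     if m == 1 or n == 1:
--         return 1
--     if m < n:
--         return apple(m,m)
--     return apple(m, n-1) + apple(m-n, n)
-- ===== SOURCE B (Python) =====
-- def apple(m, n):
--     # Bottom-up 1D dynamic programme: row[i] = number of ways to place i
--     # apples into plates when parts of size <= j have been considered.
--     if n <= 0:
--         return 1 if m == 0 else 0
--     if m <= 1 or n == 1:
--         return 1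
--     k = min(m, n)           # a part larger than m is never used
--     row = [1] + [0] * m
--     for j in range(1, k + 1):
--         for i in range(j, m + 1):
--             row[i] += row[i - j]
--     return row[m]
-- ===== Notes on version B (the rewrite author's own statement) =====
-- stated objective: faster
-- what changed: Replaces the naive exponential recursion with a bottom-up one-dimensional dynamic programme over part sizes (unbounded-knapsack style) computing the same partition count; intended as faster (exponential -> O(m*n)): a timing run measured large speedups where both finished, but A times out on most large inputs so the factor varies by run.
-- intended difference: For m = 1 with n < 0 A's early 'm == 1' guard returns 1, but with a negative number of plates there is no way to place the apple; B returns 0, the intended count. — e.g. on apple(1, -5): A returns 1, B returns 0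
import Mathlib
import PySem

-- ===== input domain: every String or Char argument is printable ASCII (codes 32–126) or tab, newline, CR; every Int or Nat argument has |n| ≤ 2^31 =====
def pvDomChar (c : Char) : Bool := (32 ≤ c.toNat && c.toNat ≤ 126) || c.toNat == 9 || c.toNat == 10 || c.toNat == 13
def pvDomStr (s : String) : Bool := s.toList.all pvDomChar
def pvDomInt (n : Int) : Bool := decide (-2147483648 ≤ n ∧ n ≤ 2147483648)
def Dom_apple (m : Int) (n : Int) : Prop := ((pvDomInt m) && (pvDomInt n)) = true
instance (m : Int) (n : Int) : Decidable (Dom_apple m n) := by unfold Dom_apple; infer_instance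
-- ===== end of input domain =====

-- B replaces A's exponential recursion by a bottom-up 1D dynamic programme; intended as faster
-- (a timing run measured B faster wherever both Pythons finished; A timed out beyond).

-- ===== PORT A =====
-- Literal port of A's recursion.  The extra 'if m < 0 ∨ n < 0 then 0' branch is a totality
-- guard only: it sits after Python's own returning guards, exactly where the Python recursion
-- stops terminating (RecursionError); such inputs are outside Pre_.
def apple (m : Int) (n : Int) : Int :=
  if m = 0 then 1
  else if n = 0 then 0
  else if m = 1 ∨ n = 1 then 1
  else if m < 0 ∨ n < 0 then 0
  else if m < n then apple m m
  else apple m (n - 1) + apple (m - n) n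
termination_by (m.toNat + n.toNat)
decreasing_by all_goals omega

-- ===== PORT B =====
-- one in-place update row[i] += row[i-j]  (indices are nonnegative whenever reached under Pre_)
def appleStep (j : Int) (row : List Int) (i : Int) : List Int :=
  row.set i.toNat (row.getD i.toNat 0 + row.getD (i - j).toNat 0)

def apple_alt (m : Int) (n : Int) : Int :=
  if n ≤ 0 then (if m = 0 then 1 else 0)
  else if m ≤ 1 ∨ n = 1 then 1
  else
    let k := min m n
    let row := (PySem.List.pyRange 1 (k + 1) 1).foldl
      (fun row j => (PySem.List.pyRange j (m + 1) 1).foldl (appleStep j) row)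
      (1 :: List.replicate m.toNat 0)
    row.getD m.toNat 0

-- ===== PRECONDITION & SPEC =====
-- Pre_ is exactly where the Python A returns: the nonnegative quadrant plus the lines
-- m = 0, n = 0, n = 1 and m = 1 reached by its leading guards; on every other input A's
-- recursion never terminates (RecursionError).
def Pre_apple (m : Int) (n : Int) : Prop :=
  (0 ≤ m ∧ 0 ≤ n) ∨ m = 0 ∨ n = 0 ∨ n = 1 ∨ (m = 1 ∧ n < 0)
instance (m : Int) (n : Int) : Decidable (Pre_apple m n) := by unfold Pre_apple; infer_instance
def pvWitness_apple : Int × Int := (5, 3)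

-- For m = 1 with n < 0 A's early 'm == 1' guard returns 1, but with a negative number of
-- plates there is no way to place the apple; B returns 0, the intended count.
def D_apple (m : Int) (n : Int) : Prop := m = 1 ∧ n < 0
instance (m : Int) (n : Int) : Decidable (D_apple m n) := by unfold D_apple; infer_instance

def Spec_apple (m : Int) (n : Int) (out : Int) : Prop := ¬ D_apple m n → out = apple_alt m n
instance (m : Int) (n : Int) (out : Int) : Decidable (Spec_apple m n out) := by unfold Spec_apple; infer_instance

def pvDiffWitness_apple : Int × Int := (1, -5)
def pvDiffWitnessOut_apple : Int × Int := (1, 0)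

-- ===== CLAIM (what is proved, stated in full; the proofs are below) =====
def Claim_unchanged_apple : Prop := ∀ (m : Int) (n : Int), Dom_apple m n → Pre_apple m n → Spec_apple m n (apple m n)
def Claim_changed_apple : Prop := Dom_apple (pvDiffWitness_apple.1) (pvDiffWitness_apple.2) ∧ Pre_apple (pvDiffWitness_apple.1) (pvDiffWitness_apple.2) ∧ D_apple (pvDiffWitness_apple.1) (pvDiffWitness_apple.2) ∧ apple (pvDiffWitness_apple.1) (pvDiffWitness_apple.2) = pvDiffWitnessOut_apple.1 ∧ apple_alt (pvDiffWitness_apple.1) (pvDiffWitness_apple.2) = pvDiffWitnessOut_apple.2 ∧ pvDiffWitnessOut_apple.1 ≠ pvDiffWitnessOut_apple.2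
def Claim_exact_apple : Prop := ∀ (m : Int) (n : Int), Dom_apple m n → Pre_apple m n → D_apple m n → apple m n ≠ apple_alt m n

-- ===== LEMMAS AND PROOFS =====

-- Reference function: number of partitions of i into parts ≤ j.
def P : Nat → Nat → Int := fun i j =>
  if i = 0 then 1
  else if j = 0 then 0
  else if j ≤ i then P i (j - 1) + P (i - j) j
  else P i (j - 1)
termination_by i j => i + j
decreasing_by all_goals omega

theorem P_zero_left (j : Nat) : P 0 j = 1 := by rw [P]; simp

theorem P_pos_zero (i : Nat) (hi : i ≠ 0) : P i 0 = 0 := by rw [P]; simp [hi]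

theorem P_one_right (i : Nat) : P i 1 = 1 := by
  induction i with
  | zero => exact P_zero_left 1
  | succ k ih =>
      rw [P]
      simp only [Nat.succ_ne_zero, if_false]
      simp [ih, P_pos_zero (k + 1) (Nat.succ_ne_zero k)]

-- P k j = P k (j-1) when k < j
theorem P_lt_step (k j : Nat) (h : k < j) : P k j = P k (j - 1) := by
  by_cases hk : k = 0
  · subst hk; rw [P_zero_left, P_zero_left]
  · rw [P, if_neg hk, if_neg (show ¬ j = 0 by omega), if_neg (Nat.not_le.mpr h)]

theorem P_of_lt (i j : Nat) (h : i < j) : P i j = P i i := by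
  induction j with
  | zero => omega
  | succ t ih =>
      rcases Nat.lt_or_ge i (t + 1) with h' | h'
      · rcases Nat.lt_or_ge i t with h'' | h''
        · rw [P_lt_step i (t + 1) h, Nat.succ_sub_one, ih h'']
        · have : i = t := by omega
          subst this
          rw [P_lt_step i (i + 1) h, Nat.succ_sub_one]
      · omega

theorem P_one_left (j : Nat) (hj : 1 ≤ j) : P 1 j = 1 := by
  rcases Nat.lt_or_ge 1 j with h | h
  · rw [P_of_lt 1 j h, P_one_right]
  · have : j = 1 := by omega
    subst this; exact P_one_right 1

-- A equals the reference on the natural domain.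
theorem apple_eq_P : ∀ (k : Nat) (m n : Int), 0 ≤ m → 0 ≤ n → m.toNat + n.toNat ≤ k →
    apple m n = P m.toNat n.toNat := by
  intro k
  induction k with
  | zero =>
      intro m n hm hn hk
      have hm0 : m = 0 := by omega
      subst hm0
      rw [apple, if_pos rfl, Int.toNat_zero, P_zero_left]
  | succ k ih =>
      intro m n hm hn hk
      rw [apple]
      by_cases h1 : m = 0
      · subst h1; rw [if_pos rfl, Int.toNat_zero, P_zero_left]
      rw [if_neg h1]
      by_cases h2 : n = 0
      · subst h2; rw [if_pos rfl, Int.toNat_zero, P_pos_zero _ (by omega)]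
      rw [if_neg h2]
      by_cases h3 : m = 1 ∨ n = 1
      · rw [if_pos h3]
        rcases h3 with h3 | h3
        · subst h3; rw [(by omega : (1:Int).toNat = 1), P_one_left _ (by omega)]
        · subst h3; rw [(by omega : (1:Int).toNat = 1), P_one_right]
      rw [if_neg h3, if_neg (by omega : ¬(m < 0 ∨ n < 0))]
      by_cases h4 : m < n
      · rw [if_pos h4, ih m m hm hm (by omega), P_of_lt m.toNat n.toNat (by omega)]
      · rw [if_neg h4]
        rw [ih m (n - 1) hm (by omega) (by omega),
            ih (m - n) n (by omega) hn (by omega)]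
        conv_rhs => rw [P]
        rw [if_neg (by omega : ¬ m.toNat = 0), if_neg (by omega : ¬ n.toNat = 0),
            if_pos (by omega : n.toNat ≤ m.toNat)]
        rw [(by omega : (n - 1).toNat = n.toNat - 1), (by omega : (m - n).toNat = m.toNat - n.toNat)]

-- getD of a set on a list, via getElem
theorem getD_set (row : List Int) (i k : Nat) (v : Int) (hk : k < row.length) :
    (row.set i v).getD k 0 = if i = k then (if i < row.length then v else row.getD k 0) else row.getD k 0 := by
  rw [List.getD_eq_getElem _ _ (by simpa using hk), List.getD_eq_getElem _ _ hk]
  rw [List.getElem_set]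
  split_ifs with h1 h2
  · rfl
  · omega
  · rfl

-- Inner loop invariant: folding appleStep j over i = i0 .. M turns a row holding
-- (P k j for k < i0, P k (j-1) for k ≥ i0) into a row holding P k j everywhere.
theorem inner_loop (M : Nat) (j : Nat) (hj : 1 ≤ j) :
    ∀ (c i : Nat), i + c = M + 1 → j ≤ i → ∀ (row : List Int), row.length = M + 1 →
    (∀ k, k < M + 1 → row.getD k 0 = if k < i then P k j else P k (j - 1)) →
    ∀ k, k < M + 1 →
      ((PySem.List.pyRange (i : Int) ((M : Int) + 1) 1).foldl (appleStep (j : Int)) row).getD k 0 = P k j := by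
  intro c
  induction c with
  | zero =>
      intro i hc hji row hlen hrow k hk
      have : ((M : Int) + 1) ≤ (i : Int) := by omega
      rw [PySem.List.pyRange_one_eq_nil this, List.foldl_nil]
      have := hrow k hk
      rw [this, if_pos (by omega)]
  | succ c ihc =>
      intro i hc hji row hlen hrow k hk
      have hib : (i : Int) < (M : Int) + 1 := by omega
      rw [PySem.List.pyRange_one_cons hib, List.foldl_cons]
      have hcast : ((i : Int) + 1) = ((i + 1 : Nat) : Int) := by push_cast; ring
      rw [hcast]
      apply ihc (i + 1) (by omega) (by omega)
      · simp [appleStep, hlen]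
      · intro k' hk'
        have hidx : ((i : Int)).toNat = i := by omega
        have hidx2 : ((i : Int) - (j : Int)).toNat = i - j := by omega
        simp only [appleStep, hidx, hidx2]
        rw [getD_set _ _ _ _ (by omega)]
        by_cases he : i = k'
        · subst he
          rw [if_pos rfl, if_pos (by omega), if_pos (by omega : i < i + 1)]
          rw [hrow i (by omega), if_neg (by omega)]
          rw [hrow (i - j) (by omega), if_pos (by omega : i - j < i)]
          conv_rhs => rw [P]
          rw [if_neg (by omega : ¬ i = 0), if_neg (by omega : ¬ j = 0), if_pos hji]
        · rw [if_neg he, hrow k' hk']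
          by_cases hlt : k' < i
          · rw [if_pos hlt, if_pos (by omega)]
          · rw [if_neg hlt, if_neg (by omega)]
      · exact hk

-- length of the row is preserved by the loops
theorem foldl_appleStep_length (l : List Int) (j : Int) (row : List Int) :
    (l.foldl (appleStep j) row).length = row.length := by
  induction l generalizing row with
  | nil => rfl
  | cons a t ih => rw [List.foldl_cons, ih]; simp [appleStep]

-- Outer loop invariant: folding the inner loop over j = t+1 .. t+c advances the row from P · t to P · (t+c).
theorem outer_loop (M : Nat) :
    ∀ (c t : Nat), ∀ (row : List Int), row.length = M + 1 →
    (∀ k, k < M + 1 → row.getD k 0 = P k t) →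
    ∀ k, k < M + 1 →
      ((PySem.List.pyRange ((t : Int) + 1) ((t : Int) + 1 + (c : Int)) 1).foldl
        (fun row j => (PySem.List.pyRange j ((M : Int) + 1) 1).foldl (appleStep j) row) row).getD k 0
      = P k (t + c) := by
  intro c
  induction c with
  | zero =>
      intro t row hlen hrow k hk
      rw [PySem.List.pyRange_one_eq_nil (by omega), List.foldl_nil]
      simpa using hrow k hk
  | succ c ihc =>
      intro t row hlen hrow k hk
      rw [PySem.List.pyRange_one_cons (by omega), List.foldl_cons]
      have hsh : (t : Int) + 1 + 1 = ((t + 1 : Nat) : Int) + 1 := by push_cast; ring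
      have hsh2 : (t : Int) + 1 + ((c : Nat) + 1 : Nat) = ((t + 1 : Nat) : Int) + 1 + (c : Int) := by push_cast; ring
      rw [hsh2, (by push_cast; ring : ((t : Int) + 1) = ((t + 1 : Nat) : Int))]
      have hstep : ∀ k, k < M + 1 →
          ((PySem.List.pyRange ((t + 1 : Nat) : Int) ((M : Int) + 1) 1).foldl
            (appleStep ((t + 1 : Nat) : Int)) row).getD k 0 = P k (t + 1) := by
        by_cases hle : t + 1 ≤ M
        · exact inner_loop M (t + 1) (by omega) (M + 1 - (t + 1)) (t + 1) (by omega) (le_refl _)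
            row hlen (by
              intro k' hk'
              rw [hrow k' hk']
              by_cases h : k' < t + 1
              · rw [if_pos h, P_lt_step k' (t + 1) h, Nat.succ_sub_one]
              · rw [if_neg h, Nat.succ_sub_one])
        · intro k' hk'
          rw [PySem.List.pyRange_one_eq_nil (by omega), List.foldl_nil, hrow k' hk',
              P_lt_step k' (t + 1) (by omega), Nat.succ_sub_one]
      have : (t + 1) + c = t + (c + 1) := by omega
      rw [← this]
      exact ihc (t + 1) _ (by rw [foldl_appleStep_length]; exact hlen) hstep k hk

-- initial row is P · 0
theorem init_row (M : Nat) : ∀ k, k < M + 1 →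
    ((1 : Int) :: List.replicate M 0).getD k 0 = P k 0 := by
  intro k hk
  cases k with
  | zero => rw [P_zero_left]; rfl
  | succ k' =>
      rw [P_pos_zero _ (Nat.succ_ne_zero k')]
      simp only [List.getD_cons_succ]
      rw [List.getD_eq_getElem _ _ (by simp; omega), List.getElem_replicate]

theorem apple_alt_eq_P (m n : Int) (hm : 0 ≤ m) (hn : 0 ≤ n) :
    apple_alt m n = P m.toNat n.toNat := by
  unfold apple_alt
  by_cases hn0 : n ≤ 0
  · rw [if_pos hn0]
    have : n.toNat = 0 := by omega
    rw [this]
    by_cases hm0 : m = 0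
    · subst hm0; rw [if_pos rfl, Int.toNat_zero, P_zero_left]
    · rw [if_neg hm0, P_pos_zero _ (by omega)]
  rw [if_neg hn0]
  by_cases htriv : m ≤ 1 ∨ n = 1
  · rw [if_pos htriv]
    rcases htriv with h | h
    · rcases (by omega : m = 0 ∨ m = 1) with h' | h' <;> subst h'
      · rw [Int.toNat_zero, P_zero_left]
      · rw [(by omega : (1:Int).toNat = 1), P_one_left _ (by omega)]
    · subst h; rw [(by omega : (1:Int).toNat = 1), P_one_right]
  rw [if_neg htriv]
  obtain ⟨M, hM⟩ : ∃ M : Nat, m = (M : Int) := ⟨m.toNat, by omega⟩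
  obtain ⟨N, hN⟩ : ∃ N : Nat, n = (N : Int) := ⟨n.toNat, by omega⟩
  subst hM; subst hN
  have hminc : min (M : Int) (N : Int) = ((min M N : Nat) : Int) := by omega
  simp only [Int.toNat_natCast, hminc]
  have h := outer_loop M (min M N) 0 (1 :: List.replicate M 0) (by simp) (init_row M) M (by omega)
  simp only [Nat.cast_zero, zero_add] at h
  rw [(by ring : (1 : Int) + ((min M N : Nat) : Int) = ((min M N : Nat) : Int) + 1)] at h
  rw [h]
  rcases le_total N M with hNM | hMN
  · rw [Nat.min_eq_right hNM]
  · rw [Nat.min_eq_left hMN]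
    rcases Nat.eq_or_lt_of_le hMN with he | hlt
    · rw [he]
    · rw [P_of_lt M N hlt]

-- ===== VERDICT (by name: the statement is the Claim_ definition above) =====
theorem apple_spec : Claim_unchanged_apple := by
  intro m n _ hpre
  unfold Spec_apple
  intro hnD
  by_cases hnn : 0 ≤ m ∧ 0 ≤ n
  · rw [apple_eq_P (m.toNat + n.toNat) m n hnn.1 hnn.2 (le_refl _),
        apple_alt_eq_P m n hnn.1 hnn.2]
  rcases hpre with h | hm0 | hn0 | hn1 | hD
  · exact absurd h hnn
  · subst hm0
    rw [apple, if_pos rfl]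
    unfold apple_alt
    by_cases hn : n ≤ 0
    · rw [if_pos hn, if_pos rfl]
    · rw [if_neg hn, if_pos (Or.inl (by omega : (0:Int) ≤ 1))]
  · subst hn0
    rw [apple]
    unfold apple_alt
    rw [if_pos (le_refl (0:Int))]
    by_cases hm : m = 0
    · rw [if_pos hm, if_pos hm]
    · rw [if_neg hm, if_pos rfl, if_neg hm]
  · subst hn1
    rw [apple]
    unfold apple_alt
    rw [if_neg (by omega : ¬(1:Int) ≤ 0)]
    by_cases hm : m = 0
    · rw [if_pos hm, if_pos (Or.inl (by omega : m ≤ 1))]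
    · rw [if_neg hm, if_neg (by omega : ¬(1:Int) = 0), if_pos (Or.inr rfl),
          if_pos (Or.inr rfl)]
  · exact absurd hD hnD

theorem apple_changed : Claim_changed_apple := by
  unfold Claim_changed_apple
  refine ⟨by decide, by decide, by decide, ?_, ?_, by decide⟩
  · show apple 1 (-5) = 1
    rw [apple]; norm_num
  · show apple_alt 1 (-5) = 0
    unfold apple_alt; norm_num

theorem apple_tight : Claim_exact_apple := by
  intro m n _ _ hD
  obtain ⟨hm1, hn⟩ := hD
  subst hm1
  rw [apple, if_neg (by omega : ¬(1:Int) = 0), if_neg (by omega : ¬ n = 0),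
      if_pos (Or.inl rfl)]
  unfold apple_alt
  rw [if_pos (by omega : n ≤ 0), if_neg (by omega : ¬(1:Int) = 0)]
  omega
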